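-- pv_equiv track=rewrite | github.com/yykzjh/sbo-poc | sbo_poc/distributed/deep_ep.py | _calc_low_latency_max_token_per_rank
-- ===== SOURCE A (Python) =====
-- def _calc_low_latency_max_token_per_rank(max_generate_batch_size: int, tp_size: int) -> int:
--     ll_num_max_token_per_rank = (max_generate_batch_size + tp_size - 1) // tp_size
--
--     matched_tokens = [
--         16,
--         24,
--         32,
--         40,
--         48,
--         56,
--         64,
--         72,
--         80,
--         88,
--         96,
--         104,
--         112,
--         120,
--         128,
--     ]
--     if ll_num_max_token_per_rank > 128:
--         ll_num_max_token_per_rank = ((ll_num_max_token_per_rank + 127) // 128) * 128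
--         return ll_num_max_token_per_rank
--     for t in matched_tokens:
--         if ll_num_max_token_per_rank <= t:
--             ll_num_max_token_per_rank = t
--             return ll_num_max_token_per_rank
--     return 128
-- ===== SOURCE B (Python) =====
-- def _calc_low_latency_max_token_per_rank(max_generate_batch_size: int, tp_size: int) -> int:
--     ll = (max_generate_batch_size + tp_size - 1) // tp_size
--     if ll > 128:
--         return ((ll + 127) // 128) * 128
--     return max(16, ((ll + 7) // 8) * 8)
-- ===== Notes on version B (the rewrite author's own statement) =====
-- stated objective: simpler
-- what changed: Replaced the 15-entry bucket table and linear scan with closed-form arithmetic: round up to a multiple of 8 with a floor of 16 (cap handled by the unchanged >128 branch).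
import Mathlib
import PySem

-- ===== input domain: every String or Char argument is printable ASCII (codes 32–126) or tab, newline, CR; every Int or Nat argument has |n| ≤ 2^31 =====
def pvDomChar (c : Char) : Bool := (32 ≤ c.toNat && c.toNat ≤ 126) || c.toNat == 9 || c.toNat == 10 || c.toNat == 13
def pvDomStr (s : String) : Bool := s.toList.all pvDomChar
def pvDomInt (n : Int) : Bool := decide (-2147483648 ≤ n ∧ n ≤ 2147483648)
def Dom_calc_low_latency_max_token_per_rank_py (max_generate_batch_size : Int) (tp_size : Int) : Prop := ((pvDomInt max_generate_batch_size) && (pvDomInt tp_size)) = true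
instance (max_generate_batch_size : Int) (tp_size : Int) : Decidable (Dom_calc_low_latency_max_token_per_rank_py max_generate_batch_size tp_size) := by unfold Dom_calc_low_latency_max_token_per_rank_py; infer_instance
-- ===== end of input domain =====

-- B replaces A's 15-entry bucket table and linear scan with closed-form round-up arithmetic (objective: simpler).

-- ===== PORT A =====
-- the 'for t in matched_tokens' loop with its 'return 128' fallback
def pvScanA (ll : Int) : List Int → Int
  | [] => 128
  | t :: ts => if ll ≤ t then t else pvScanA ll ts

def calc_low_latency_max_token_per_rank_py (max_generate_batch_size : Int) (tp_size : Int) : Int :=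
  let ll := PySem.Int.floordiv (max_generate_batch_size + tp_size - 1) tp_size
  let matched_tokens : List Int := [16, 24, 32, 40, 48, 56, 64, 72, 80, 88, 96, 104, 112, 120, 128]
  if ll > 128 then (PySem.Int.floordiv (ll + 127) 128) * 128
  else pvScanA ll matched_tokens

-- ===== PORT B =====
def calc_low_latency_max_token_per_rank_py_alt (max_generate_batch_size : Int) (tp_size : Int) : Int :=
  let ll := PySem.Int.floordiv (max_generate_batch_size + tp_size - 1) tp_size
  if ll > 128 then (PySem.Int.floordiv (ll + 127) 128) * 128
  else max 16 ((PySem.Int.floordiv (ll + 7) 8) * 8)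

-- ===== PRECONDITION & SPEC =====
-- Pre_ excludes exactly tp_size = 0, where Python's '//' raises ZeroDivisionError in both A and B.
def Pre_calc_low_latency_max_token_per_rank_py (max_generate_batch_size : Int) (tp_size : Int) : Prop := tp_size ≠ 0
instance (max_generate_batch_size : Int) (tp_size : Int) : Decidable (Pre_calc_low_latency_max_token_per_rank_py max_generate_batch_size tp_size) := by unfold Pre_calc_low_latency_max_token_per_rank_py; infer_instance
def pvWitness_calc_low_latency_max_token_per_rank_py : Int × Int := (64, 4)

def Spec_calc_low_latency_max_token_per_rank_py (max_generate_batch_size : Int) (tp_size : Int) (out : Int) : Prop := out = calc_low_latency_max_token_per_rank_py_alt max_generate_batch_size tp_size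
instance (max_generate_batch_size : Int) (tp_size : Int) (out : Int) : Decidable (Spec_calc_low_latency_max_token_per_rank_py max_generate_batch_size tp_size out) := by unfold Spec_calc_low_latency_max_token_per_rank_py; infer_instance

-- ===== CLAIM (what is proved, stated in full; the proofs are below) =====
def Claim_equal_calc_low_latency_max_token_per_rank_py : Prop := ∀ (max_generate_batch_size : Int) (tp_size : Int), Dom_calc_low_latency_max_token_per_rank_py max_generate_batch_size tp_size → Pre_calc_low_latency_max_token_per_rank_py max_generate_batch_size tp_size → Spec_calc_low_latency_max_token_per_rank_py max_generate_batch_size tp_size (calc_low_latency_max_token_per_rank_py max_generate_batch_size tp_size)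

-- ===== LEMMAS AND PROOFS =====
-- the table scan equals the closed-form round-up (for any ll ≤ 128)
theorem pvScanA_eq (ll : Int) (h : ll ≤ 128) :
    pvScanA ll [16, 24, 32, 40, 48, 56, 64, 72, 80, 88, 96, 104, 112, 120, 128]
      = max 16 ((PySem.Int.floordiv (ll + 7) 8) * 8) := by
  rw [PySem.Int.floordiv_eq_ediv_of_pos (by norm_num)]
  by_cases h0 : ll ≤ (16 : Int)
  · rw [pvScanA, if_pos h0]; omega
  rw [pvScanA, if_neg h0]
  by_cases h1 : ll ≤ (24 : Int)
  · rw [pvScanA, if_pos h1]; omega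
  rw [pvScanA, if_neg h1]
  by_cases h2 : ll ≤ (32 : Int)
  · rw [pvScanA, if_pos h2]; omega
  rw [pvScanA, if_neg h2]
  by_cases h3 : ll ≤ (40 : Int)
  · rw [pvScanA, if_pos h3]; omega
  rw [pvScanA, if_neg h3]
  by_cases h4 : ll ≤ (48 : Int)
  · rw [pvScanA, if_pos h4]; omega
  rw [pvScanA, if_neg h4]
  by_cases h5 : ll ≤ (56 : Int)
  · rw [pvScanA, if_pos h5]; omega
  rw [pvScanA, if_neg h5]
  by_cases h6 : ll ≤ (64 : Int)
  · rw [pvScanA, if_pos h6]; omega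
  rw [pvScanA, if_neg h6]
  by_cases h7 : ll ≤ (72 : Int)
  · rw [pvScanA, if_pos h7]; omega
  rw [pvScanA, if_neg h7]
  by_cases h8 : ll ≤ (80 : Int)
  · rw [pvScanA, if_pos h8]; omega
  rw [pvScanA, if_neg h8]
  by_cases h9 : ll ≤ (88 : Int)
  · rw [pvScanA, if_pos h9]; omega
  rw [pvScanA, if_neg h9]
  by_cases h10 : ll ≤ (96 : Int)
  · rw [pvScanA, if_pos h10]; omega
  rw [pvScanA, if_neg h10]
  by_cases h11 : ll ≤ (104 : Int)
  · rw [pvScanA, if_pos h11]; omega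
  rw [pvScanA, if_neg h11]
  by_cases h12 : ll ≤ (112 : Int)
  · rw [pvScanA, if_pos h12]; omega
  rw [pvScanA, if_neg h12]
  by_cases h13 : ll ≤ (120 : Int)
  · rw [pvScanA, if_pos h13]; omega
  rw [pvScanA, if_neg h13]
  by_cases h14 : ll ≤ (128 : Int)
  · rw [pvScanA, if_pos h14]; omega
  rw [pvScanA, if_neg h14]
  rw [pvScanA]; omega

-- ===== VERDICT (by name: the statement is the Claim_ definition above) =====
theorem calc_low_latency_max_token_per_rank_py_spec : Claim_equal_calc_low_latency_max_token_per_rank_py := by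
  intro m t _ _
  unfold Spec_calc_low_latency_max_token_per_rank_py
  unfold calc_low_latency_max_token_per_rank_py calc_low_latency_max_token_per_rank_py_alt
  set ll := PySem.Int.floordiv (m + t - 1) t with hll
  by_cases h : ll > 128
  · simp [h]
  · simp [h, pvScanA_eq ll (by omega)]
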